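-- pv_equiv track=rewrite | github.com/ddatunashvili/python_mini_exams | EX_3.py | check
-- ===== SOURCE A (Python) =====
-- def check(string):
--     crt = {'open': 1}
--     count = 0
--     for i in string:
--         # 0 სწორია შეცვლილი ან დაამატე 0
--         if i == "(":
--             # თუ ღიაა სწორია
--             if crt['open'] == 0:
--                 return 'არასწორია'
--
--             # გახსნა
--             else:
--                 crt["open"] = 0
--
--         # 1 არასწორია ან 0 იანია და დახურე
--         elif i == ")":
--             # თუ ღია არაა არასწორია
--             if crt["open"] != 0:
--                 return "არასწორია"
--             # დახურვა
--             else: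
--                 crt["open"] = 1
--
--     if crt['open'] == 0:
--         return 'არასწორია'
--
--     elif crt['open'] == 1:
--         return "სწორია"
-- ===== SOURCE B (Python) =====
-- def check(string):
--     parens = ''.join(c for c in string if c in '()')
--     return 'სწორია' if parens == '()' * (len(parens) // 2) else 'არასწორია'
-- ===== Notes on version B (the rewrite author's own statement) =====
-- stated objective: simpler
-- what changed: Replaced the per-character open/close toggle state machine with early returns by extracting the parenthesis subsequence once and comparing it against the open-close pair repeated half its length times.
import Mathlib
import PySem

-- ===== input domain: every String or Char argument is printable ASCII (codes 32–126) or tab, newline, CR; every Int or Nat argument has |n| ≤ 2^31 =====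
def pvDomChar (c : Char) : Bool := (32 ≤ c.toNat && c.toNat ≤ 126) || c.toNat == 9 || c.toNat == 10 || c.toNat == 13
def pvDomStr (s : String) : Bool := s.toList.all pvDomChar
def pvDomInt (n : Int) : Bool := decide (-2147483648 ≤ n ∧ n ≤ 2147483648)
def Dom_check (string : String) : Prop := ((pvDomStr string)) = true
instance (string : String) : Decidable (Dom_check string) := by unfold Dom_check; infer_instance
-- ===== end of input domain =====

-- B replaces A's toggle-state machine with a filter + one pattern comparison (simpler decomposition, same cost).

-- ===== PORT A =====
-- the loop of A: state `o` is crt['open']; early returns become result values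
def checkLoop (cs : List Char) (o : Int) : String :=
  match cs with
  | [] =>
    if o = 0 then "არასწორია"
    else if o = 1 then "სწორია"
    else ""  -- unreachable: Python falls off returning None; state is only ever 0 or 1
  | c :: rest =>
    if c = '(' then
      if o = 0 then "არასწორია" else checkLoop rest 0
    else if c = ')' then
      if o ≠ 0 then "არასწორია" else checkLoop rest 1
    else checkLoop rest o

def check (string : String) : String := checkLoop string.toList 1

-- ===== PORT B =====
def check_alt (string : String) : String :=
  let parens := string.toList.filter (fun c => c = '(' || c = ')')
  if parens = (List.replicate (parens.length / 2) ['(', ')']).flatten then "სწორია"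
  else "არასწორია"

-- ===== PRECONDITION & SPEC =====
def Spec_check (string : String) (out : String) : Prop := out = check_alt string
instance (string : String) (out : String) : Decidable (Spec_check string out) := by unfold Spec_check; infer_instance

-- ===== CLAIM (what is proved, stated in full; the proofs are below) =====
def Claim_equal_check : Prop := ∀ (string : String), Dom_check string → Spec_check string (check string)

-- ===== LEMMAS AND PROOFS =====

-- characters that are not parentheses do not change the loop's behaviour
theorem checkLoop_filter (cs : List Char) (o : Int) :
    checkLoop cs o = checkLoop (cs.filter (fun c => c = '(' || c = ')')) o := by
  induction cs generalizing o with
  | nil => rfl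
  | cons c rest ih =>
    by_cases h1 : c = '('
    · simp [checkLoop, h1, List.filter]
      split <;> simp [ih]
    · by_cases h2 : c = ')'
      · simp [checkLoop, h2, List.filter]
        split <;> simp [ih]
      · simp [checkLoop, h1, h2, List.filter, ih]

def pat (k : Nat) : List Char := (List.replicate k ['(', ')']).flatten

theorem pat_succ (k : Nat) : pat (k + 1) = '(' :: ')' :: pat k := by
  simp [pat, List.replicate_succ]

-- on paren-only lists the loop from state 1 decides exactly the pattern equality
theorem checkLoop_pat : ∀ (ps : List Char), (∀ c ∈ ps, c = '(' ∨ c = ')') →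
    checkLoop ps 1 = if ps = pat (ps.length / 2) then "სწორია" else "არასწორია"
  | [], _ => by simp [checkLoop, pat]
  | [c], hp => by
    rcases hp c (by simp) with h | h <;> subst h
    · simp [checkLoop, pat]
    · have hne : ∀ k, ([')'] : List Char) ≠ pat k := by
        intro k
        cases k with
        | zero => simp [pat]
        | succ k => rw [pat_succ]; simp
      simp [checkLoop, hne]
  | c1 :: c2 :: r, hp => by
    rcases hp c1 (by simp) with h1 | h1 <;> subst h1
    · rcases hp c2 (by simp) with h2 | h2 <;> subst h2
      · -- "((" : the second open parenthesis hits state 0 and A answers wrong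
        have hne : ∀ k, ('(' :: '(' :: r) ≠ pat k := by
          intro k
          cases k with
          | zero => simp [pat]
          | succ k => rw [pat_succ]; simp
        simp [checkLoop, hne]
      · -- "()" followed by the rest: both sides reduce to the rest
        have ih := checkLoop_pat r (fun c hc => hp c (by simp [hc]))
        have hstep : checkLoop ('(' :: ')' :: r) 1 = checkLoop r 1 := by
          simp [checkLoop]
        have hdiv : ('(' :: ')' :: r).length / 2 = r.length / 2 + 1 := by
          simp only [List.length_cons]; omega
        rw [hstep, ih, hdiv, pat_succ]
        simp
    · -- leading ")" : A answers wrong, and no pattern starts with ")"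
      have hne : ∀ k, (')' :: c2 :: r) ≠ pat k := by
        intro k
        cases k with
        | zero => simp [pat]
        | succ k => rw [pat_succ]; simp
      simp [checkLoop, hne]

-- ===== VERDICT (by name: the statement is the Claim_ definition above) =====
theorem check_spec : Claim_equal_check := by
  intro s _
  unfold Spec_check check check_alt
  rw [checkLoop_filter]
  rw [checkLoop_pat _ (by intro c hc; simpa using (List.mem_filter.mp hc).2)]
  rfl
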